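-- pv_equiv track=rewrite | github.com/matei-oltean/advent2022Python | 25.py | to_base_5
-- ===== SOURCE A (Python) =====
-- def to_base_5(n):
--     res = ''
--     while n > 0:
--         r = n % 5
--         n //= 5
--         if 0 <= r <= 2:
--             res += str(r)
--             continue
--         n += 1
--         r = r-5
--         if r == -2:
--             res += '='
--         else:
--             res += '-'
--     return res[::-1]
-- ===== SOURCE B (Python) =====
-- def to_base_5(n):
--     if n <= 0:
--         return ''
--     q, r = divmod(n + 2, 5)
--     return to_base_5(q) + "=-012"[r]
-- ===== Notes on version B (the rewrite author's own statement) =====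
-- stated objective: simpler
-- what changed: Replaced the branching while-loop with carry handling and a final string reversal by a three-line recursion using the bias trick divmod(n+2,5), which maps the remainder directly into the digit table "=-012" and builds the string most-significant-first, so no branches and no reversal.
import Mathlib
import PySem

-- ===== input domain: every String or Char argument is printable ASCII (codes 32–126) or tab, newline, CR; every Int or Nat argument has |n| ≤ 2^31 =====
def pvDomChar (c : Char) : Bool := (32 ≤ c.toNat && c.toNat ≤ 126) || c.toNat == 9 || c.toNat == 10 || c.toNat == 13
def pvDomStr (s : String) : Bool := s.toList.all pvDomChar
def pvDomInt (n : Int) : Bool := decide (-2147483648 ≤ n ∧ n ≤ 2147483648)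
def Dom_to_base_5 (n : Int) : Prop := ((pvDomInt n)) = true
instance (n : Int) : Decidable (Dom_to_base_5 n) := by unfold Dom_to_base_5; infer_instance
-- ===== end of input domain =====

-- B replaces A's branching loop + final reversal by a short recursion on divmod(n+2,5) ("simpler"); same result on every Int.

-- ===== PORT A =====
-- the while-loop of A, carrying the accumulated string `res` as a List Char
def toBase5Loop (n : Int) (res : List Char) : List Char :=
  if 0 < n then
    -- r = n % 5; n //= 5
    if 0 ≤ PySem.Int.mod n 5 ∧ PySem.Int.mod n 5 ≤ 2 then
      toBase5Loop (PySem.Int.floordiv n 5) (res ++ (PySem.Int.toStr (PySem.Int.mod n 5)).toList)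
    else
      -- n += 1; r = r - 5
      if PySem.Int.mod n 5 - 5 = -2 then
        toBase5Loop (PySem.Int.floordiv n 5 + 1) (res ++ ['='])
      else
        toBase5Loop (PySem.Int.floordiv n 5 + 1) (res ++ ['-'])
  else res
termination_by n.toNat
decreasing_by
  all_goals
    simp only [PySem.Int.floordiv_eq_ediv_of_pos (by omega : (0:Int) < 5),
      PySem.Int.mod_eq_emod_of_pos (by omega : (0:Int) < 5)] at *
    omega

-- res[::-1] is List.reverse (PySem.List.slice?_none_none_neg_one)
def to_base_5 (n : Int) : String := String.ofList (toBase5Loop n []).reverse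

-- ===== PORT B =====
def to_base_5_alt (n : Int) : String :=
  if n ≤ 0 then ""
  else
    -- q, r = divmod(n + 2, 5); return to_base_5(q) + "=-012"[r]  (r is provably in 0..4, so pyGetD is exact)
    String.ofList ((to_base_5_alt (PySem.Int.floordiv (n + 2) 5)).toList
      ++ [PySem.List.pyGetD "=-012".toList (PySem.Int.mod (n + 2) 5) '?'])
termination_by n.toNat
decreasing_by
  simp only [PySem.Int.floordiv_eq_ediv_of_pos (by omega : (0:Int) < 5)]
  omega

-- ===== PRECONDITION & SPEC =====
def Spec_to_base_5 (n : Int) (out : String) : Prop := out = to_base_5_alt n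
instance (n : Int) (out : String) : Decidable (Spec_to_base_5 n out) := by unfold Spec_to_base_5; infer_instance

-- ===== CLAIM (what is proved, stated in full; the proofs are below) =====
def Claim_equal_to_base_5 : Prop := ∀ (n : Int), Dom_to_base_5 n → Spec_to_base_5 n (to_base_5 n)

-- ===== LEMMAS AND PROOFS =====

lemma alt_toList (n : Int) : (to_base_5_alt n).toList =
    if n ≤ 0 then []
    else (to_base_5_alt (PySem.Int.floordiv (n + 2) 5)).toList
      ++ [PySem.List.pyGetD "=-012".toList (PySem.Int.mod (n + 2) 5) '?'] := by
  rw [to_base_5_alt]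
  split <;> simp

lemma loop_reverse : ∀ (k : Nat) (n : Int), n.toNat ≤ k → ∀ res : List Char,
    (toBase5Loop n res).reverse = (to_base_5_alt n).toList ++ res.reverse := by
  intro k
  induction k with
  | zero =>
    intro n hk res
    have hn : n ≤ 0 := by omega
    rw [toBase5Loop, alt_toList]
    simp [hn, not_lt.mpr hn]
  | succ k ih =>
    intro n hk res
    by_cases hn : 0 < n
    · rw [toBase5Loop, alt_toList]
      have h5 : (0:Int) < 5 := by omega
      simp only [if_pos hn, if_neg (by omega : ¬ n ≤ 0),
        PySem.Int.mod_eq_emod_of_pos h5, PySem.Int.floordiv_eq_ediv_of_pos h5]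
      have hm : n % 5 = 0 ∨ n % 5 = 1 ∨ n % 5 = 2 ∨ n % 5 = 3 ∨ n % 5 = 4 := by omega
      rcases hm with hm | hm | hm | hm | hm
      · rw [if_pos (by omega : (0:Int) ≤ n % 5 ∧ n % 5 ≤ 2), ih (n / 5) (by omega)]
        have hq : (n + 2) / 5 = n / 5 := by omega
        have hr2 : (n + 2) % 5 = 2 := by omega
        simp [hq, hr2, hm, PySem.List.pyGetD, PySem.List.pyGet?, PySem.List.pyIdx?, PySem.Int.toStr,
          (by decide : PySem.Int.toChars (0:Int) = ['0'])]
      · rw [if_pos (by omega : (0:Int) ≤ n % 5 ∧ n % 5 ≤ 2), ih (n / 5) (by omega)]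
        have hq : (n + 2) / 5 = n / 5 := by omega
        have hr2 : (n + 2) % 5 = 3 := by omega
        simp [hq, hr2, hm, PySem.List.pyGetD, PySem.List.pyGet?, PySem.List.pyIdx?, PySem.Int.toStr,
          (by decide : PySem.Int.toChars (1:Int) = ['1'])]
      · rw [if_pos (by omega : (0:Int) ≤ n % 5 ∧ n % 5 ≤ 2), ih (n / 5) (by omega)]
        have hq : (n + 2) / 5 = n / 5 := by omega
        have hr2 : (n + 2) % 5 = 4 := by omega
        simp [hq, hr2, hm, PySem.List.pyGetD, PySem.List.pyGet?, PySem.List.pyIdx?, PySem.Int.toStr,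
          (by decide : PySem.Int.toChars (2:Int) = ['2'])]
      · rw [if_neg (by omega : ¬((0:Int) ≤ n % 5 ∧ n % 5 ≤ 2)),
          if_pos (by omega : n % 5 - 5 = -2), ih (n / 5 + 1) (by omega)]
        have hq : (n + 2) / 5 = n / 5 + 1 := by omega
        have hr2 : (n + 2) % 5 = 0 := by omega
        simp [hq, hr2, PySem.List.pyGetD, PySem.List.pyGet?, PySem.List.pyIdx?]
      · rw [if_neg (by omega : ¬((0:Int) ≤ n % 5 ∧ n % 5 ≤ 2)),
          if_neg (by omega : ¬(n % 5 - 5 = -2)), ih (n / 5 + 1) (by omega)]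
        have hq : (n + 2) / 5 = n / 5 + 1 := by omega
        have hr2 : (n + 2) % 5 = 1 := by omega
        simp [hq, hr2, PySem.List.pyGetD, PySem.List.pyGet?, PySem.List.pyIdx?]
    · rw [toBase5Loop, alt_toList]
      simp [hn, (by omega : n ≤ 0)]

-- ===== VERDICT (by name: the statement is the Claim_ definition above) =====
theorem to_base_5_spec : Claim_equal_to_base_5 := by
  intro n _
  unfold Spec_to_base_5 to_base_5
  rw [loop_reverse n.toNat n (le_refl _) []]
  simp
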